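-- pv_equiv track=rewrite | github.com/mat10tng/doctorEulerPython | doctorPrime.py | findPrimeDivisorCountUnder
-- ===== SOURCE A (Python) =====
-- def findPrimeDivisorCountUnder(z):
--     naturalLst = list(range(1,z))
--     divisor_lst =[0]*(z-1)
--     p = 2
--     while p*2 < z:
--         for x in range(p+p-1,len(divisor_lst),p):
--             naturalLst[x] = 0
--             divisor_lst[x]+=1
--         p+= 1
--         while (naturalLst[p-1]== 0 ):
--             p+= 1
--
--     return divisor_lst
-- ===== SOURCE B (Python) =====
-- def findPrimeDivisorCountUnder(z):
--     # count, for every n in 1..z-1, the distinct prime divisors of n that are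
--     # strictly smaller than n, by trial division of each n over a precomputed
--     # table of the primes below sqrt(z)
--     limit = 2
--     while limit * limit < z:
--         limit += 1
--     primes = [d for d in range(2, limit) if all(d % e != 0 for e in range(2, d))]
--     divisor_lst = [0] * (z - 1)
--     for n in range(2, z):
--         m = n
--         count = 0
--         for p in primes:
--             if p * p > m:
--                 break
--             if m % p == 0:
--                 count += 1
--                 while m % p == 0:
--                     m //= p
--         if m > 1 and m != n:   # leftover prime factor, counted only when a proper divisor
--             count += 1
--         divisor_lst[n - 1] = count
--     return divisor_lst
-- ===== Notes on version B (the rewrite author's own statement) =====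
-- stated objective: alternative
-- what changed: Replaces the shared sieve (crossing out the multiples of each prime found by scanning for the next uncrossed number) by per-number trial division: a table of the primes below sqrt(z) is built once by trial division, then each n is factored independently over that table, counting the leftover prime factor only when it is a proper divisor.
import Mathlib
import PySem

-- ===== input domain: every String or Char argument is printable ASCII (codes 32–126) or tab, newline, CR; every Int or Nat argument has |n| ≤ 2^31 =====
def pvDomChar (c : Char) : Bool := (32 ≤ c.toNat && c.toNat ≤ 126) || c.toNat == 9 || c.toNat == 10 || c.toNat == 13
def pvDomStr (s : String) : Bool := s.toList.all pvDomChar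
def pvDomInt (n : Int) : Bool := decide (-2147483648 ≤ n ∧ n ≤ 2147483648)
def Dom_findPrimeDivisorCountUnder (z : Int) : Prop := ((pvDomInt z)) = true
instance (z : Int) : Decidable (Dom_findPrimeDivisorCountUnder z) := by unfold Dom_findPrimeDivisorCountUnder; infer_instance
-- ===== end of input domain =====

-- B replaces A's shared sieve by independent per-number trial division (an alternative
-- algorithm of similar cost); the return value is proved identical for every z.

-- ===== PORT A =====
-- inner 'while naturalLst[p-1]==0: p+=1' (fuel-bounded scan; 'none' = IndexError, unreachable)
def sieveAdvance : Nat → List Int → Int → Int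
  | 0, _, p => p
  | f+1, nat, p =>
    match PySem.List.pyGet? nat (p-1) with
    | some v => if v == 0 then sieveAdvance f nat (p+1) else p
    | none => p

-- outer 'while p*2 < z' with the 'for x in range(p+p-1, len(divisor_lst), p)' body
def sieveLoop (z : Int) : Nat → Int → List Int → List Int → List Int
  | 0, _, _, div => div
  | f+1, p, nat, div =>
    if p * 2 < z then
      let xs := PySem.List.pyRange (p+p-1) (div.length : Int) p
      let st := xs.foldl (fun s x =>
        (PySem.List.pySetD s.1 x 0, PySem.List.pySetD s.2 x (PySem.List.pyGetD s.2 x 0 + 1))) (nat, div)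
      sieveLoop z f (sieveAdvance (st.1.length + 1) st.1 (p+1)) st.1 st.2
    else div

def findPrimeDivisorCountUnder (z : Int) : List Int :=
  sieveLoop z z.toNat 2 (PySem.List.pyRange 1 z 1) (List.replicate (z-1).toNat 0)

-- ===== PORT B =====
-- 'while limit * limit < z: limit += 1'
def limitLoop (z : Int) : Nat → Int → Int
  | 0, l => l
  | f+1, l => if l * l < z then limitLoop z f (l+1) else l

-- 'all(d % e != 0 for e in range(2, d))'
def isPrimeTrial (d : Int) : Bool :=
  (PySem.List.pyRange 2 d 1).all (fun e => !(PySem.Int.mod d e == 0))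

-- 'while m % d == 0: m //= d'
def stripB : Nat → Int → Int → Int
  | 0, m, _ => m
  | f+1, m, d => if PySem.Int.mod m d == 0 then stripB f (PySem.Int.floordiv m d) d else m

-- 'for p in primes: if p*p > m: break; ...' ; returns (m, count)
def innerB : List Int → Int → Int → Int × Int
  | [], m, c => (m, c)
  | p :: ps, m, c =>
    if p * p > m then (m, c)
    else if PySem.Int.mod m p == 0 then innerB ps (stripB m.toNat m p) (c+1)
    else innerB ps m c

def findPrimeDivisorCountUnder_alt (z : Int) : List Int :=
  let limit := limitLoop z z.toNat 2
  let primes := (PySem.List.pyRange 2 limit 1).filter isPrimeTrial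
  (PySem.List.pyRange 2 z 1).foldl (fun lst n =>
    let mc := innerB primes n 0
    let c := if 1 < mc.1 ∧ mc.1 ≠ n then mc.2 + 1 else mc.2
    PySem.List.pySetD lst (n-1) c) (List.replicate (z-1).toNat 0)

-- ===== PRECONDITION & SPEC =====
def Spec_findPrimeDivisorCountUnder (z : Int) (out : List Int) : Prop := out = findPrimeDivisorCountUnder_alt z
instance (z : Int) (out : List Int) : Decidable (Spec_findPrimeDivisorCountUnder z out) := by unfold Spec_findPrimeDivisorCountUnder; infer_instance

-- ===== CLAIM (what is proved, stated in full; the proofs are below) =====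
def Claim_equal_findPrimeDivisorCountUnder : Prop := ∀ (z : Int), Dom_findPrimeDivisorCountUnder z → Spec_findPrimeDivisorCountUnder z (findPrimeDivisorCountUnder z)

-- ===== LEMMAS AND PROOFS =====

-- common spec: cnt d n = number of primes below d dividing n;
-- cnt n n counts the prime divisors of n that are strictly below n
def cnt (d n : Nat) : Nat := ((Finset.range d).filter (fun p => Nat.Prime p ∧ p ∣ n)).card

def specList (z : Int) : List Int := (List.range (z-1).toNat).map (fun i => (cnt (i+1) (i+1) : Int))

def crossCnt (P n : Nat) : Nat := ((Finset.range P).filter (fun q => Nat.Prime q ∧ q ∣ n ∧ q ≠ n)).card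
abbrev isCrossed (P n : Nat) : Prop := ∃ q, q < P ∧ Nat.Prime q ∧ q ∣ n ∧ q ≠ n

theorem getD_set (l : List Int) (i j : Nat) (v : Int) :
    (l.set i v).getD j 0 = if i = j ∧ j < l.length then v else l.getD j 0 := by
  rw [List.getD_eq_getElem?_getD, List.getD_eq_getElem?_getD, List.getElem?_set]
  split_ifs with h1 h2 h3 h4 <;> first | rfl | omega | (exfalso; omega) | (rw [List.getElem?_eq_none (show l.length ≤ j by omega)])

-- effect of the crossing for-loop on both lists
theorem fold_cross (xs : List Int) :
    ∀ (nat div : List Int), (∀ x ∈ xs, 0 ≤ x) →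
      ((xs.foldl (fun s x => (PySem.List.pySetD s.1 x 0, PySem.List.pySetD s.2 x (PySem.List.pyGetD s.2 x 0 + 1))) (nat, div)).1.length = nat.length ∧
       (xs.foldl (fun s x => (PySem.List.pySetD s.1 x 0, PySem.List.pySetD s.2 x (PySem.List.pyGetD s.2 x 0 + 1))) (nat, div)).2.length = div.length ∧
       (∀ i : Nat, i < nat.length →
         (xs.foldl (fun s x => (PySem.List.pySetD s.1 x 0, PySem.List.pySetD s.2 x (PySem.List.pyGetD s.2 x 0 + 1))) (nat, div)).1.getD i 0
           = if (i:Int) ∈ xs then 0 else nat.getD i 0) ∧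
       (∀ i : Nat, i < div.length →
         (xs.foldl (fun s x => (PySem.List.pySetD s.1 x 0, PySem.List.pySetD s.2 x (PySem.List.pyGetD s.2 x 0 + 1))) (nat, div)).2.getD i 0
           = div.getD i 0 + xs.count (i:Int))) := by
  induction xs with
  | nil => intro nat div _; exact ⟨rfl, rfl, fun i _ => by simp, fun i _ => by simp⟩
  | cons x t ih =>
    intro nat div hx
    have hx0 : (0:Int) ≤ x := hx x List.mem_cons_self
    have hset1 : PySem.List.pySetD nat x 0 = nat.set x.toNat 0 := PySem.List.pySetD_of_nonneg _ _ hx0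
    have hget : PySem.List.pyGetD div x 0 = div.getD x.toNat 0 := PySem.List.pyGetD_of_nonneg _ _ hx0
    have hset2 : PySem.List.pySetD div x (PySem.List.pyGetD div x 0 + 1)
        = div.set x.toNat (div.getD x.toNat 0 + 1) := by
      rw [hget]; exact PySem.List.pySetD_of_nonneg _ _ hx0
    simp only [List.foldl_cons, hset1, hset2]
    obtain ⟨l1, l2, v1, v2⟩ := ih (nat.set x.toNat 0) (div.set x.toNat (div.getD x.toNat 0 + 1))
      (fun y hy => hx y (List.mem_cons_of_mem _ hy))
    rw [List.length_set] at l1 l2 v1 v2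
    refine ⟨l1, l2, fun i hi => ?_, fun i hi => ?_⟩
    · rw [v1 i hi, getD_set]
      by_cases hmem : (i:Int) ∈ t
      · rw [if_pos hmem, if_pos (show (i:Int) ∈ x :: t from List.mem_cons_of_mem _ hmem)]
      · rw [if_neg hmem]
        by_cases hix : (i:Int) = x
        · rw [if_pos (show x.toNat = i ∧ i < nat.length from ⟨by omega, hi⟩),
              if_pos (show (i:Int) ∈ x :: t from List.mem_cons.mpr (Or.inl hix))]
        · rw [if_neg (show ¬ (i:Int) ∈ x :: t by
                rw [List.mem_cons]; rintro (h | h); exact hix h; exact hmem h),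
              if_neg (show ¬ (x.toNat = i ∧ i < nat.length) by rintro ⟨h, _⟩; exact hix (by omega))]
    · rw [v2 i hi, getD_set, List.count_cons]
      by_cases hix : (i:Int) = x
      · rw [if_pos (show x.toNat = i ∧ i < div.length from ⟨by omega, hi⟩),
            if_pos (show ((x == (i:Int)) = true) from beq_iff_eq.mpr hix.symm)]
        have hxi : x.toNat = i := by omega
        rw [hxi]
        push_cast
        ring
      · rw [if_neg (show ¬ (x.toNat = i ∧ i < div.length) by rintro ⟨h, _⟩; exact hix (by omega)),
            if_neg (show ¬ ((x == (i:Int)) = true) by simpa using fun h => hix h.symm)]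
        push_cast
        ring

theorem mem_crossRange (p L i : Int) (hp : 2 ≤ p) (hi : 0 ≤ i) :
    (i ∈ PySem.List.pyRange (p+p-1) L p) ↔ (i < L ∧ p ∣ (i+1) ∧ p + p ≤ i + 1) := by
  rw [PySem.List.mem_pyRange_iff_of_pos (by omega)]
  constructor
  · rintro ⟨h1, h2, k, hk⟩
    have hk0 : 0 ≤ k := by nlinarith
    refine ⟨h2, ⟨k + 2, by rw [show i + 1 = (i - (p+p-1)) + p + p by ring, hk]; ring⟩, by nlinarith⟩
  · rintro ⟨h1, ⟨k, hk⟩, h3⟩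
    have hk2 : 2 ≤ k := by nlinarith
    exact ⟨by omega, h1, ⟨k - 2, by rw [show i - (p+p-1) = i + 1 - p - p by ring, hk]; ring⟩⟩

theorem nodup_crossRange (p L : Int) (hp : 2 ≤ p) :
    (PySem.List.pyRange (p+p-1) L p).Nodup := by
  rw [PySem.List.pyRange_of_pos _ _ (by omega)]
  refine List.nodup_range.map ?_
  intro a b hab
  dsimp only at hab
  have h2 : (p:Int) * a = p * b := by linarith
  exact_mod_cast mul_left_cancel₀ (by omega : (p:Int) ≠ 0) h2

theorem count_crossRange (p L i : Int) (hp : 2 ≤ p) (hi : 0 ≤ i) :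
    ((PySem.List.pyRange (p+p-1) L p).count i : Int)
      = if i < L ∧ p ∣ (i+1) ∧ p + p ≤ i + 1 then 1 else 0 := by
  by_cases h : i < L ∧ p ∣ (i+1) ∧ p + p ≤ i + 1
  · rw [if_pos h]
    have := List.count_eq_one_of_mem (nodup_crossRange p L hp) ((mem_crossRange p L i hp hi).mpr h)
    exact_mod_cast this
  · rw [if_neg h]
    have := List.count_eq_zero_of_not_mem (fun hm => h ((mem_crossRange p L i hp hi).mp hm))
    exact_mod_cast this

theorem crossCnt_succ (P n : Nat) (hP : Nat.Prime P) :
    crossCnt (P+1) n = crossCnt P n + if (P ∣ n ∧ P ≠ n) then 1 else 0 := by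
  unfold crossCnt
  rw [Finset.range_add_one, Finset.filter_insert]
  split_ifs with h1 h2 h3
  · rw [Finset.card_insert_of_notMem (by simp)]
  · exact absurd ⟨h1.2.1, h1.2.2⟩ h2
  · exact absurd ⟨hP, h3.1, h3.2⟩ h1
  · rfl

theorem isCrossed_succ (P n : Nat) (hP : Nat.Prime P) :
    isCrossed (P+1) n ↔ (isCrossed P n ∨ (P ∣ n ∧ P ≠ n)) := by
  constructor
  · rintro ⟨q, hq1, hq2, hq3, hq4⟩
    rcases Nat.lt_or_ge q P with h | h
    · exact Or.inl ⟨q, h, hq2, hq3, hq4⟩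
    · have : q = P := by omega
      subst this
      exact Or.inr ⟨hq3, hq4⟩
  · rintro (⟨q, hq1, hq2, hq3, hq4⟩ | ⟨h1, h2⟩)
    · exact ⟨q, by omega, hq2, hq3, hq4⟩
    · exact ⟨P, by omega, hP, h1, h2⟩

theorem crossed_stable (A B n : Nat) (hAB : A ≤ B)
    (hnp : ∀ q, A ≤ q → q < B → ¬ Nat.Prime q) :
    (isCrossed B n ↔ isCrossed A n) ∧ crossCnt B n = crossCnt A n := by
  constructor
  · constructor
    · rintro ⟨q, h1, h2, h3, h4⟩
      rcases Nat.lt_or_ge q A with h | h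
      · exact ⟨q, h, h2, h3, h4⟩
      · exact absurd h2 (hnp q h h1)
    · rintro ⟨q, h1, h2, h3, h4⟩
      exact ⟨q, by omega, h2, h3, h4⟩
  · unfold crossCnt
    congr 1
    ext q
    simp only [Finset.mem_filter, Finset.mem_range]
    constructor
    · rintro ⟨h1, h2, h3, h4⟩
      rcases Nat.lt_or_ge q A with h | h
      · exact ⟨h, h2, h3, h4⟩
      · exact absurd h2 (hnp q h h1)
    · rintro ⟨h1, h2, h3, h4⟩
      exact ⟨by omega, h2, h3, h4⟩

-- the prime-advance scan: reaches the first index holding a nonzero value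
theorem sieveAdvance_eq (nat : List Int) (b : Int)
    (hb : ∃ v, PySem.List.pyGet? nat (b-1) = some v ∧ v ≠ 0) :
    ∀ (f : Nat) (a : Int), a ≤ b →
      (∀ j : Int, a ≤ j → j < b → PySem.List.pyGet? nat (j-1) = some 0) →
      (b - a).toNat < f →
      sieveAdvance f nat a = b := by
  intro f
  induction f with
  | zero => intro a _ _ h; omega
  | succ f ih =>
    intro a hab hzero hf
    rcases eq_or_lt_of_le hab with rfl | hlt
    · obtain ⟨v, hv1, hv2⟩ := hb
      simp only [sieveAdvance, hv1]
      rw [if_neg (by simpa using hv2)]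
    · have h0 := hzero a (le_refl a) hlt
      simp only [sieveAdvance, h0]
      rw [if_pos (show ((0:Int) == 0) = true from rfl)]
      exact ih (a+1) (by omega) (fun j h1 h2 => hzero j (by omega) h2) (by omega)

def crossFold (p : Int) (nat div : List Int) : List Int × List Int :=
  (PySem.List.pyRange (p+p-1) (div.length : Int) p).foldl
    (fun s x => (PySem.List.pySetD s.1 x 0, PySem.List.pySetD s.2 x (PySem.List.pyGetD s.2 x 0 + 1))) (nat, div)

def IA (z p : Int) (nat div : List Int) : Prop :=
  2 ≤ p ∧ Nat.Prime p.toNat ∧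
  nat.length = (z-1).toNat ∧ div.length = (z-1).toNat ∧
  (∀ i : Nat, i < (z-1).toNat → nat.getD i 0 = if isCrossed p.toNat (i+1) then 0 else ((i:Int)+1)) ∧
  (∀ i : Nat, i < (z-1).toNat → div.getD i 0 = (crossCnt p.toNat (i+1) : Int))

theorem dvd_twice_iff (P n : Nat) (hP : 2 ≤ P) (hn : 1 ≤ n) (hd : P ∣ n) :
    2 * P ≤ n ↔ n ≠ P := by
  obtain ⟨k, hk⟩ := hd
  constructor
  · intro h; omega
  · intro h
    have hk1 : 1 ≤ k := by
      rcases Nat.eq_zero_or_pos k with h0 | h0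
      · subst h0; omega
      · exact h0
    have hk2 : 2 ≤ k := by
      rcases Nat.lt_or_ge k 2 with h2 | h2
      · interval_cases k
        · exact absurd (by omega : n = P) h
      · exact h2
    calc 2 * P = P * 2 := by ring
    _ ≤ P * k := Nat.mul_le_mul_left P hk2
    _ = n := hk.symm

theorem final_cnt (P n : Nat) (hn : 1 ≤ n)
    (hbound : ∀ q, Nat.Prime q → q ∣ n → q ≠ n → q < P) :
    crossCnt P n = cnt n n := by
  unfold crossCnt cnt
  congr 1
  ext q
  simp only [Finset.mem_filter, Finset.mem_range]
  constructor
  · rintro ⟨h1, h2, h3, h4⟩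
    have := Nat.le_of_dvd (by omega) h3
    exact ⟨by omega, h2, h3⟩
  · rintro ⟨h1, h2, h3⟩
    exact ⟨hbound q h2 h3 (by omega), h2, h3, by omega⟩

theorem final_div (z p : Int) (nat div : List Int) (h : IA z p nat div) (hstop : z ≤ p * 2) :
    div = specList z := by
  obtain ⟨hp2, hpp, hlen1, hlen2, hnat, hdiv⟩ := h
  have hpz : ((p.toNat : Nat) : Int) = p := Int.toNat_of_nonneg (by omega)
  unfold specList
  apply List.ext_getElem (by rw [hlen2]; simp)
  intro i h1 h2
  have hiL : i < (z-1).toNat := by rw [hlen2] at h1; exact h1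
  have hmap : (List.map (fun i => ((cnt (i+1) (i+1) : Nat) : Int)) (List.range (z-1).toNat))[i]
      = ((cnt (i+1) (i+1) : Nat) : Int) := by
    rw [List.getElem_map]
    congr 2 <;> rw [List.getElem_range]
  rw [hmap, ← List.getD_eq_getElem _ 0 h1, hdiv i hiL]
  congr 1
  apply final_cnt _ _ (by omega)
  intro q hq hqd hqn
  obtain ⟨k, hk⟩ := hqd
  have hk2 : 2 ≤ k := by
    rcases Nat.lt_or_ge k 2 with h2 | h2
    · interval_cases k <;> omega
    · exact h2
  have h2q : 2 * q ≤ i + 1 := by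
    calc 2 * q = q * 2 := by ring
    _ ≤ q * k := Nat.mul_le_mul_left q hk2
    _ = i + 1 := hk.symm
  -- 2q ≤ i+1 ≤ z-1 < 2p, hence q < p
  omega

theorem crossRange_nonneg (p L' : Int) (hp : 2 ≤ p) :
    ∀ x ∈ PySem.List.pyRange (p+p-1) L' p, 0 ≤ x := by
  intro x hx
  rw [PySem.List.mem_pyRange_iff_of_pos (by omega)] at hx
  omega

theorem sieveLoop_inv (z : Int) :
    ∀ (f : Nat) (p : Int) (nat div : List Int), IA z p nat div → (z - p).toNat ≤ f →
      sieveLoop z f p nat div = specList z := by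
  intro f
  induction f with
  | zero =>
    intro p nat div hIA hf
    have hp2 : 2 ≤ p := hIA.1
    exact final_div z p nat div hIA (by omega)
  | succ f ih =>
    intro p nat div hIA hf
    obtain ⟨hp2, hpp, hlen1, hlen2, hnat, hdiv⟩ := hIA
    by_cases hc : p * 2 < z
    · -- one more sieve round
      have hstep : sieveLoop z (f+1) p nat div =
          sieveLoop z f (sieveAdvance ((crossFold p nat div).1.length + 1) (crossFold p nat div).1 (p+1))
            (crossFold p nat div).1 (crossFold p nat div).2 := by
        simp only [sieveLoop]
        rw [if_pos hc]
        rfl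
      rw [hstep]
      set P := p.toNat with hPdef
      have hpz : ((P : Nat) : Int) = p := Int.toNat_of_nonneg (by omega)
      have hP2 : 2 ≤ P := by omega
      set L := (z-1).toNat with hLdef
      have hL2P : 2 * P ≤ L := by omega
      obtain ⟨l1, l2, v1, v2⟩ := fold_cross (PySem.List.pyRange (p+p-1) ((div.length : Nat) : Int) p)
        nat div (crossRange_nonneg p _ hp2)
      have hN1 : (crossFold p nat div).1 = ((PySem.List.pyRange (p+p-1) ((div.length : Nat) : Int) p).foldl
          (fun s x => (PySem.List.pySetD s.1 x 0, PySem.List.pySetD s.2 x (PySem.List.pyGetD s.2 x 0 + 1))) (nat, div)).1 := rfl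
      have hD1 : (crossFold p nat div).2 = ((PySem.List.pyRange (p+p-1) ((div.length : Nat) : Int) p).foldl
          (fun s x => (PySem.List.pySetD s.1 x 0, PySem.List.pySetD s.2 x (PySem.List.pyGetD s.2 x 0 + 1))) (nat, div)).2 := rfl
      -- membership in the crossing range, in terms of the number i+1
      have hmem : ∀ i : Nat, i < L →
          (((i:Int) ∈ PySem.List.pyRange (p+p-1) ((div.length : Nat) : Int) p) ↔ (P ∣ (i+1) ∧ (i+1) ≠ P)) := by
        intro i hi
        rw [mem_crossRange p _ _ hp2 (by omega)]
        have hdvd_iff : (p ∣ ((i:Int)+1)) ↔ (P ∣ (i+1 : Nat)) := by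
          rw [← hpz]
          constructor
          · intro h; exact_mod_cast h
          · intro h; exact_mod_cast h
        constructor
        · rintro ⟨_, h2, h3⟩
          have hdP : P ∣ (i+1) := hdvd_iff.mp h2
          exact ⟨hdP, (dvd_twice_iff P (i+1) hP2 (by omega) hdP).mp (by omega)⟩
        · rintro ⟨h1, h2⟩
          have h2P : 2 * P ≤ i + 1 := (dvd_twice_iff P (i+1) hP2 (by omega) h1).mpr h2
          exact ⟨by rw [hlen2]; omega, hdvd_iff.mpr h1, by omega⟩
      have nat1val : ∀ i : Nat, i < L →
          (crossFold p nat div).1.getD i 0 = if isCrossed (P+1) (i+1) then 0 else ((i:Int)+1) := by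
        intro i hi
        rw [hN1, v1 i (by rw [hlen1]; exact hi)]
        by_cases hm : (i:Int) ∈ PySem.List.pyRange (p+p-1) ((div.length : Nat) : Int) p
        · rw [if_pos hm]
          obtain ⟨hd, hne⟩ := (hmem i hi).mp hm
          rw [if_pos ((isCrossed_succ P (i+1) hpp).mpr (Or.inr ⟨hd, Ne.symm hne⟩))]
        · rw [if_neg hm, hnat i hi]
          by_cases hcr : isCrossed P (i+1)
          · rw [if_pos hcr, if_pos ((isCrossed_succ P (i+1) hpp).mpr (Or.inl hcr))]
          · rw [if_neg hcr, if_neg (by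
              intro hcr1
              rcases (isCrossed_succ P (i+1) hpp).mp hcr1 with h | h
              · exact hcr h
              · exact hm ((hmem i hi).mpr ⟨h.1, Ne.symm h.2⟩))]
      have div1val : ∀ i : Nat, i < L →
          (crossFold p nat div).2.getD i 0 = ((crossCnt (P+1) (i+1) : Nat) : Int) := by
        intro i hi
        rw [hD1, v2 i (by rw [hlen2]; exact hi), hdiv i hi, crossCnt_succ P (i+1) hpp]
        have hcount := count_crossRange p ((div.length : Nat) : Int) (i:Int) hp2 (by omega)
        rw [hcount]
        have hCint : ((i:Int) < ((div.length : Nat) : Int) ∧ p ∣ (i:Int)+1 ∧ p+p ≤ (i:Int)+1)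
            ↔ (P ∣ (i+1) ∧ (i+1) ≠ P) := by
          rw [← mem_crossRange p _ _ hp2 (by omega)]
          exact hmem i hi
        by_cases hm : P ∣ (i+1) ∧ (i+1) ≠ P
        · rw [if_pos (hCint.mpr hm), if_pos (show P ∣ i+1 ∧ P ≠ i+1 from ⟨hm.1, Ne.symm hm.2⟩)]
          push_cast
          ring
        · rw [if_neg (fun h => hm (hCint.mp h)),
              if_neg (show ¬(P ∣ i+1 ∧ P ≠ i+1) from fun h => hm ⟨h.1, Ne.symm h.2⟩)]
          push_cast
          ring
      -- the next prime
      have hex : ∃ q, P < q ∧ Nat.Prime q := by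
        obtain ⟨q0, hq1, hq2, hq3⟩ := Nat.exists_prime_lt_and_le_two_mul P (by omega)
        exact ⟨q0, hq2, hq1⟩
      set P' := Nat.find hex with hP'def
      obtain ⟨hPP', hP'p⟩ := Nat.find_spec hex
      have hP'2P : P' ≤ 2 * P := by
        obtain ⟨q0, hq1, hq2, hq3⟩ := Nat.exists_prime_lt_and_le_two_mul P (by omega)
        exact le_trans (Nat.find_min' hex ⟨hq2, hq1⟩) hq3
      have hmin : ∀ m, P < m → m < P' → ¬ Nat.Prime m := by
        intro m h1 h2 hm
        exact (Nat.find_min hex h2) ⟨h1, hm⟩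
      have hlenN1 : (crossFold p nat div).1.length = L := by rw [hN1, l1, hlen1]
      have hlenD1 : (crossFold p nat div).2.length = L := by rw [hD1, l2, hlen2]
      -- the advance scan lands exactly on P'
      have hadv : sieveAdvance ((crossFold p nat div).1.length + 1) (crossFold p nat div).1 (p+1) = ((P' : Nat) : Int) := by
        apply sieveAdvance_eq
        · -- the slot of P' is uncrossed
          refine ⟨((P'-1 : Nat) : Int) + 1, ?_, ?_⟩
          · have hidx : ((P' : Nat) : Int) - 1 = ((P'-1 : Nat) : Int) := by omega
            rw [hidx, PySem.List.pyGet?_natCast]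
            have hlt : P' - 1 < (crossFold p nat div).1.length := by omega
            rw [List.getElem?_eq_getElem hlt, ← List.getD_eq_getElem _ 0 hlt]
            have : P' - 1 + 1 = P' := by omega
            rw [nat1val (P'-1) (by omega), this, if_neg (by
              rintro ⟨q, hq1, hq2, hq3, hq4⟩
              exact hq4 ((Nat.prime_dvd_prime_iff_eq hq2 hP'p).mp hq3))]
          · have : (0:Int) < ((P'-1 : Nat) : Int) + 1 := by omega
            omega
        · omega
        · -- everything between p+1 and P' is crossed
          intro j hj1 hj2
          have hjN : ((j.toNat : Nat) : Int) = j := Int.toNat_of_nonneg (by omega)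
          set jN := j.toNat with hjNdef
          have hjNb : P < jN ∧ jN < P' := by omega
          have hjcomp : ¬ Nat.Prime jN := hmin jN hjNb.1 hjNb.2
          have hjN2 : 2 ≤ jN := by omega
          have hidx : j - 1 = ((jN - 1 : Nat) : Int) := by omega
          rw [hidx, PySem.List.pyGet?_natCast]
          have hlt : jN - 1 < (crossFold p nat div).1.length := by omega
          rw [List.getElem?_eq_getElem hlt, ← List.getD_eq_getElem _ 0 hlt]
          have hsucc : jN - 1 + 1 = jN := by omega
          rw [nat1val (jN-1) (by omega), hsucc, if_pos ?_]
          -- jN is composite, hence crossed by its least prime factor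
          have hqp := Nat.minFac_prime (show jN ≠ 1 by omega)
          have hqd := Nat.minFac_dvd jN
          have hqq : jN.minFac * jN.minFac ≤ jN := by
            have := Nat.minFac_sq_le_self (by omega) hjcomp
            simpa [pow_two] using this
          have hqne : jN.minFac ≠ jN := by
            intro h
            exact hjcomp ((Nat.prime_def_minFac.mpr ⟨hjN2, h⟩))
          have hqP : jN.minFac < P + 1 := by nlinarith
          exact ⟨jN.minFac, hqP, hqp, hqd, hqne⟩
        · omega
      rw [hadv]
      -- invariant is re-established at the next prime
      apply ih
      · refine ⟨by omega, ?_, by rw [hlenN1], by rw [hlenD1], ?_, ?_⟩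
        · have : ((P' : Nat) : Int).toNat = P' := by omega
          rw [this]; exact hP'p
        · intro i hi
          have : ((P' : Nat) : Int).toNat = P' := by omega
          rw [this, nat1val i hi]
          have hstab := crossed_stable (P+1) P' (i+1) (by omega)
            (fun q h1 h2 => hmin q (by omega) h2)
          rw [if_congr hstab.1 rfl rfl]
        · intro i hi
          have : ((P' : Nat) : Int).toNat = P' := by omega
          rw [this, div1val i hi]
          have hstab := crossed_stable (P+1) P' (i+1) (by omega)
            (fun q h1 h2 => hmin q (by omega) h2)
          rw [hstab.2]
      · omega
    · -- loop exits
      have hstep : sieveLoop z (f+1) p nat div = div := by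
        simp only [sieveLoop]
        rw [if_neg hc]
      rw [hstep]
      exact final_div z p nat div ⟨hp2, hpp, hlen1, hlen2, hnat, hdiv⟩ (by omega)

theorem IA_init (z : Int) (hz : 5 ≤ z) :
    IA z 2 (PySem.List.pyRange 1 z 1) (List.replicate (z-1).toNat 0) := by
  refine ⟨by norm_num, by decide, ?_, ?_, ?_, ?_⟩
  · rw [PySem.List.length_pyRange_one]
  · rw [List.length_replicate]
  · intro i hi
    have hcr : ¬ isCrossed (2:Int).toNat (i+1) := by
      rintro ⟨q, hq1, hq2, _, _⟩
      have : q < 2 := by norm_num at hq1; omega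
      interval_cases q
      · exact Nat.not_prime_zero hq2
      · exact Nat.not_prime_one hq2
    rw [if_neg hcr, PySem.List.pyRange_one, List.getD_eq_getElem?_getD, List.getElem?_map,
        List.getElem?_range (by simpa using hi)]
    simp only [Option.map_some, Option.getD_some]
    ring
  · intro i hi
    rw [List.getD_replicate _ hi]
    have : crossCnt (2:Int).toNat (i+1) = 0 := by
      unfold crossCnt
      rw [Finset.card_eq_zero, Finset.filter_eq_empty_iff]
      intro q hq
      simp only [Finset.mem_range] at hq
      rintro ⟨hqp, _, _⟩
      have : q < 2 := by norm_num at hq; omega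
      interval_cases q
      · exact Nat.not_prime_zero hqp
      · exact Nat.not_prime_one hqp
    rw [this]
    rfl

theorem portA_eq_spec (z : Int) : findPrimeDivisorCountUnder z = specList z := by
  unfold findPrimeDivisorCountUnder
  by_cases hz : 5 ≤ z
  · exact sieveLoop_inv z z.toNat 2 _ _ (IA_init z hz) (by omega)
  · have hspec : specList z = List.replicate (z-1).toNat 0 := by
      unfold specList
      apply List.ext_getElem (by simp)
      intro i h1 h2
      have hiL : i < (z-1).toNat := by simpa using h1
      have hi3 : i < 3 := by omega
      rw [List.getElem_map, List.getElem_range, List.getElem_replicate]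
      interval_cases i <;> decide
    have h4 : z.toNat ≤ 4 := by omega
    rcases h : z.toNat with _ | k
    · simp only [sieveLoop]
      rw [hspec]
    · simp only [sieveLoop]
      rw [if_neg (by omega), hspec]

def stripN : Nat → Nat → Nat → Nat
  | 0, m, _ => m
  | f+1, m, d => if m % d = 0 then stripN f (m / d) d else m

def trialN : Nat → Nat → Nat → Nat → Nat × Nat
  | 0, m, _, c => (m, c)
  | f+1, m, d, c =>
    if d * d ≤ m then
      if m % d = 0 then trialN f (stripN m m d) (d+1) (c+1)
      else trialN f m (d+1) c
    else (m, c)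

theorem stripB_eq (f : Nat) (m d : Nat) (hd : 0 < d) :
    stripB f (m : Int) (d : Int) = (stripN f m d : Int) := by
  induction f generalizing m with
  | zero => simp [stripB, stripN]
  | succ f ih =>
    simp only [stripB, stripN]
    rw [PySem.Int.mod_eq_emod_of_pos (by exact_mod_cast hd)]
    rw [PySem.Int.floordiv_eq_ediv_of_pos (by exact_mod_cast hd)]
    by_cases h : m % d = 0
    · have hm : ((m : Int) % (d : Int) == 0) = true := by
        rw [← Int.natCast_emod]; simp [h]
      rw [hm, if_pos rfl, ← Int.natCast_ediv, ih, if_pos h]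
    · have hm : ((m : Int) % (d : Int) == 0) = false := by
        rw [← Int.natCast_emod]; exact beq_eq_false_iff_ne.mpr (by exact_mod_cast h)
      rw [hm]; simp [h]

theorem stripN_spec (d : Nat) (hd : 2 ≤ d) :
    ∀ (f m : Nat), 1 ≤ m → m ≤ f →
      ∃ k, m = d ^ k * stripN f m d ∧ ¬ d ∣ stripN f m d ∧ 1 ≤ stripN f m d ∧ (d ∣ m → 1 ≤ k) := by
  intro f
  induction f with
  | zero => intro m hm hf; omega
  | succ f ih =>
    intro m hm hf
    by_cases h : m % d = 0
    · have hdvd : d ∣ m := Nat.dvd_of_mod_eq_zero h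
      have hq : 1 ≤ m / d := Nat.one_le_div_iff (by omega) |>.mpr (Nat.le_of_dvd (by omega) hdvd)
      have hlt : m / d < m := Nat.div_lt_self (by omega) (by omega)
      obtain ⟨k, hk1, hk2, hk3, _⟩ := ih (m / d) hq (by omega)
      refine ⟨k + 1, ?_, ?_, ?_, fun _ => by omega⟩
      · have hmd : m = d * (m / d) := by
          rw [Nat.mul_comm]; exact (Nat.div_mul_cancel hdvd).symm
        calc m = d * (m / d) := hmd
        _ = d * (d ^ k * stripN f (m/d) d) := by rw [← hk1]
        _ = d ^ (k+1) * stripN f (m/d) d := by ring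
        _ = d ^ (k+1) * stripN (f+1) m d := by simp [stripN, h]
      · simpa [stripN, h] using hk2
      · simpa [stripN, h] using hk3
    · refine ⟨0, by simp [stripN, h], ?_, by simp [stripN, h]; omega, fun hdvd => absurd (Nat.mod_eq_zero_of_dvd hdvd) h⟩
      simp only [stripN, if_neg h]
      intro hd'
      exact h (Nat.mod_eq_zero_of_dvd hd')

theorem cnt_succ (d n : Nat) :
    cnt (d+1) n = cnt d n + if (Nat.Prime d ∧ d ∣ n) then 1 else 0 := by
  unfold cnt
  rw [Finset.range_add_one, Finset.filter_insert]
  split_ifs with h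
  · rw [Finset.card_insert_of_notMem (by simp)]
  · rfl

theorem trial_exit (n d m c s : Nat) (hn : 2 ≤ n) (hd : 2 ≤ d) (hm : 1 ≤ m) (hns : n = s * m)
    (he : ∀ e, 2 ≤ e → e < d → ¬ e ∣ m) (hs : ∀ p, Nat.Prime p → p ∣ s → p < d ∧ p * p ≤ n)
    (hc : c = cnt d n) (hdm : m < d * d) :
    c + (if 1 < m ∧ m ≠ n then 1 else 0) = cnt n n := by
  have hmn : m ∣ n := ⟨s, by rw [hns]; ring⟩
  have hmlen : m ≤ n := Nat.le_of_dvd (by omega) hmn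
  have hsplit : ∀ p, Nat.Prime p → p ∣ n → p ∣ s ∨ p ∣ m := by
    intro p hp hpn
    rw [hns] at hpn
    exact (Nat.Prime.dvd_mul hp).mp hpn
  have hnotm : ∀ p, Nat.Prime p → p ∣ s → p < n := by
    intro p hp hps
    have := (hs p hp hps).2
    have h2 := hp.two_le
    nlinarith
  have hm1 : m = 1 ∨ Nat.Prime m := by
    by_cases h1 : m = 1
    · exact Or.inl h1
    · right
      by_contra hnp
      have hq := Nat.minFac_prime h1
      have hqd := Nat.minFac_dvd m
      have hsq : m.minFac * m.minFac ≤ m := by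
        have := Nat.minFac_sq_le_self (by omega) hnp
        simpa [pow_two] using this
      have hqlt : m.minFac < d := by nlinarith [hq.two_le]
      exact he m.minFac hq.two_le hqlt hqd
  rcases hm1 with h1 | hmp
  · -- m = 1 : every prime factor of n lies in s, count is complete
    subst h1
    have hset : (Finset.range n).filter (fun p => Nat.Prime p ∧ p ∣ n)
        = (Finset.range d).filter (fun p => Nat.Prime p ∧ p ∣ n) := by
      ext q
      simp only [Finset.mem_filter, Finset.mem_range]
      constructor
      · rintro ⟨hqn, hqp, hqd⟩
        refine ⟨?_, hqp, hqd⟩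
        rcases hsplit q hqp hqd with hqs | hqm
        · exact (hs q hqp hqs).1
        · exact absurd (Nat.eq_one_of_dvd_one hqm) hqp.ne_one
      · rintro ⟨hqd', hqp, hqd⟩
        refine ⟨?_, hqp, hqd⟩
        rcases hsplit q hqp hqd with hqs | hqm
        · exact hnotm q hqp hqs
        · exact absurd (Nat.eq_one_of_dvd_one hqm) hqp.ne_one
    simp only [cnt] at hc ⊢
    rw [hset, ← hc]
    simp
  · by_cases hmn' : m = n
    · -- n itself is prime: nothing is counted
      subst hmn'
      have hcd : cnt d m = 0 := by
        unfold cnt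
        rw [Finset.card_eq_zero, Finset.filter_eq_empty_iff]
        intro q hq
        simp only [Finset.mem_range] at hq
        rintro ⟨hqp, hqd⟩
        have : q = m := (Nat.prime_dvd_prime_iff_eq hqp hmp).mp hqd
        subst this
        exact he q hqp.two_le hq (dvd_refl q)
      have hcn : cnt m m = 0 := by
        unfold cnt
        rw [Finset.card_eq_zero, Finset.filter_eq_empty_iff]
        intro q hq
        simp only [Finset.mem_range] at hq
        rintro ⟨hqp, hqd⟩
        have : q = m := (Nat.prime_dvd_prime_iff_eq hqp hmp).mp hqd
        omega
      rw [hc, hcd, hcn]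
      simp
    · -- leftover prime m is a proper divisor: one more than counted
      have hs2 : 2 ≤ s := by
        rcases Nat.lt_or_ge s 2 with h | h
        · interval_cases s <;> omega
        · exact h
      have hmltn : m < n := Nat.lt_of_le_of_ne hmlen hmn'
      have hset : (Finset.range n).filter (fun p => Nat.Prime p ∧ p ∣ n)
          = insert m ((Finset.range d).filter (fun p => Nat.Prime p ∧ p ∣ n)) := by
        ext q
        simp only [Finset.mem_filter, Finset.mem_range, Finset.mem_insert]
        constructor
        · rintro ⟨hqn, hqp, hqd⟩
          rcases hsplit q hqp hqd with hqs | hqm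
          · exact Or.inr ⟨(hs q hqp hqs).1, hqp, hqd⟩
          · exact Or.inl ((Nat.prime_dvd_prime_iff_eq hqp hmp).mp hqm)
        · rintro (rfl | ⟨hqd', hqp, hqd⟩)
          · exact ⟨hmltn, hmp, hmn⟩
          · refine ⟨?_, hqp, hqd⟩
            rcases hsplit q hqp hqd with hqs | hqm
            · exact hnotm q hqp hqs
            · have : q = m := (Nat.prime_dvd_prime_iff_eq hqp hmp).mp hqm
              subst this
              exact absurd hqd' (by intro h'; exact he q hqp.two_le h' (dvd_refl q))
      have hnotmem : m ∉ (Finset.range d).filter (fun p => Nat.Prime p ∧ p ∣ n) := by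
        simp only [Finset.mem_filter, Finset.mem_range]
        rintro ⟨hmd, _, _⟩
        exact he m hmp.two_le hmd (dvd_refl m)
      have : cnt n n = cnt d n + 1 := by
        unfold cnt
        rw [hset, Finset.card_insert_of_notMem hnotmem]
      rw [hc, this, if_pos ⟨hmp.one_lt, hmn'⟩]

theorem fold_set_eval (g : Int → Int) (b : Int) :
    ∀ (t : Nat) (a : Int) (init : List Int), 1 ≤ a → (b - a).toNat = t →
      (((PySem.List.pyRange a b 1).foldl (fun lst n => PySem.List.pySetD lst (n-1) (g n)) init).length = init.length ∧
       ∀ i : Nat, i < init.length →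
        ((PySem.List.pyRange a b 1).foldl (fun lst n => PySem.List.pySetD lst (n-1) (g n)) init).getD i 0
          = if a ≤ (i:Int)+1 ∧ (i:Int)+1 < b then g ((i:Int)+1) else init.getD i 0) := by
  intro t
  induction t with
  | zero =>
    intro a init ha ht
    rw [PySem.List.pyRange_one_eq_nil (by omega)]
    refine ⟨rfl, fun i hi => ?_⟩
    rw [if_neg (by omega)]
    rfl
  | succ t ih =>
    intro a init ha ht
    have hab : a < b := by omega
    rw [PySem.List.pyRange_one_cons hab]
    simp only [List.foldl_cons]
    have hset : PySem.List.pySetD init (a-1) (g a) = init.set (a-1).toNat (g a) :=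
      PySem.List.pySetD_of_nonneg init _ (by omega)
    rw [hset]
    obtain ⟨hlen, hval⟩ := ih (a+1) (init.set (a-1).toNat (g a)) (by omega) (by omega)
    rw [List.length_set] at hlen hval
    refine ⟨hlen, fun i hi => ?_⟩
    rw [hval i hi, getD_set]
    by_cases hia : (i:Int) + 1 = a
    · have h1 : (a-1).toNat = i := by omega
      rw [if_neg (show ¬(a + 1 ≤ (i:Int) + 1 ∧ (i:Int) + 1 < b) by omega),
          if_pos (show (a-1).toNat = i ∧ i < init.length from ⟨h1, hi⟩),
          if_pos (show a ≤ (i:Int) + 1 ∧ (i:Int) + 1 < b by omega), ← hia]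
    · have h1 : (a-1).toNat ≠ i := by omega
      rw [if_neg (show ¬((a-1).toNat = i ∧ i < init.length) from fun h => h1 h.1)]
      by_cases hc : a + 1 ≤ (i:Int) + 1 ∧ (i:Int) + 1 < b
      · rw [if_pos hc, if_pos (show a ≤ (i:Int) + 1 ∧ (i:Int) + 1 < b by omega)]
      · rw [if_neg hc, if_neg (show ¬(a ≤ (i:Int) + 1 ∧ (i:Int) + 1 < b) by omega)]

theorem prime_inv_to_all (d m : Nat) (hm : 1 ≤ m)
    (h : ∀ q, Nat.Prime q → q < d → ¬ q ∣ m) :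
    ∀ e, 2 ≤ e → e < d → ¬ e ∣ m := by
  intro e he2 hlt hdvd
  exact h e.minFac (Nat.minFac_prime (by omega))
    (lt_of_le_of_lt (Nat.minFac_le (by omega)) hlt)
    (dvd_trans (Nat.minFac_dvd e) hdvd)

theorem limitLoop_spec (z : Int) :
    ∀ (f : Nat) (l : Int), 2 ≤ l → (z - l).toNat ≤ f →
      2 ≤ limitLoop z f l ∧ l ≤ limitLoop z f l ∧ z ≤ limitLoop z f l * limitLoop z f l ∧
      (∀ l', l ≤ l' → l' < limitLoop z f l → l' * l' < z) := by
  intro f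
  induction f with
  | zero =>
    intro l hl hf
    have hll : l ≤ l * l := by nlinarith
    simp only [limitLoop]
    exact ⟨hl, le_refl l, by omega, fun l' h1 h2 => by omega⟩
  | succ f ih =>
    intro l hl hf
    by_cases h : l * l < z
    · have hlz : l < z := by nlinarith
      have hgoal : limitLoop z (f+1) l = limitLoop z f (l+1) := by simp [limitLoop, h]
      rw [hgoal]
      obtain ⟨h1, h2, h3, h4⟩ := ih (l+1) (by omega) (by omega)
      refine ⟨h1, by omega, h3, fun l' h5 h6 => ?_⟩
      rcases eq_or_lt_of_le h5 with rfl | h7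
      · exact h
      · exact h4 l' (by omega) h6
    · have hgoal : limitLoop z (f+1) l = l := by simp [limitLoop, h]
      rw [hgoal]
      exact ⟨hl, le_refl l, by omega, fun l' h1 h2 => by omega⟩

def trialPN : List Nat → Nat → Nat → Nat × Nat
  | [], m, c => (m, c)
  | p :: ps, m, c =>
    if p * p > m then (m, c)
    else if m % p = 0 then trialPN ps (stripN m m p) (c+1)
    else trialPN ps m c

theorem innerB_eq (psN : List Nat) :
    ∀ (m c : Nat), (∀ q ∈ psN, 1 ≤ q) →
      innerB (psN.map (fun (q : Nat) => (q:Int))) (m : Int) (c : Int)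
        = (((trialPN psN m c).1 : Int), ((trialPN psN m c).2 : Int)) := by
  induction psN with
  | nil => intro m c _; simp [innerB, trialPN]
  | cons p ps ih =>
    intro m c hq
    have hp1 : 1 ≤ p := hq p List.mem_cons_self
    rw [List.map_cons]
    simp only [innerB, trialPN]
    by_cases h1 : p * p > m
    · rw [if_pos (by exact_mod_cast h1), if_pos h1]
    · rw [if_neg (by exact_mod_cast h1), if_neg h1]
      rw [PySem.Int.mod_eq_emod_of_pos (by exact_mod_cast hp1)]
      by_cases h2 : m % p = 0
      · have hm : ((m : Int) % (p : Int) == 0) = true := by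
          rw [← Int.natCast_emod]; simp [h2]
        rw [hm, if_pos rfl, if_pos h2]
        have ht : ((m : Int)).toNat = m := Int.toNat_natCast m
        rw [ht, stripB_eq _ _ _ (by omega)]
        have := ih (stripN m m p) (c+1) (fun q hh => hq q (List.mem_cons_of_mem _ hh))
        push_cast at this ⊢
        exact this
      · have hm : ((m : Int) % (p : Int) == 0) = false := by
          rw [← Int.natCast_emod]; exact beq_eq_false_iff_ne.mpr (by exact_mod_cast h2)
        rw [hm, if_neg (by simp), if_neg h2]
        exact ih m c (fun q hh => hq q (List.mem_cons_of_mem _ hh))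

def primesIn (d limit : Nat) : List Nat :=
  (List.range' d (limit - d)).filter (fun q => decide (Nat.Prime q))

theorem primesIn_nil (d limit : Nat) (h : limit ≤ d) : primesIn d limit = [] := by
  unfold primesIn
  rw [show limit - d = 0 by omega, List.range'_zero, List.filter_nil]

theorem primesIn_cons (d limit : Nat) (h : d < limit) :
    primesIn d limit = if Nat.Prime d then d :: primesIn (d+1) limit else primesIn (d+1) limit := by
  unfold primesIn
  rw [show limit - d = (limit - (d+1)) + 1 by omega, List.range'_succ, List.filter_cons]
  by_cases h1 : Nat.Prime d
  · rw [if_pos (by simp [h1]), if_pos h1]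
  · rw [if_neg (by simp [h1]), if_neg h1]

theorem isPrimeTrial_iff (d : Int) (hd : 2 ≤ d) :
    isPrimeTrial d = true ↔ Nat.Prime d.toNat := by
  unfold isPrimeTrial
  rw [List.all_eq_true]
  constructor
  · intro h
    rw [Nat.prime_def_lt]
    refine ⟨by omega, fun mm hmm hdvd => ?_⟩
    by_contra hne
    have hmm0 : mm ≠ 0 := by
      rintro rfl
      have : d.toNat = 0 := Nat.eq_zero_of_zero_dvd hdvd
      omega
    have hmm2 : 2 ≤ mm := by omega
    have hmem : ((mm : Nat) : Int) ∈ PySem.List.pyRange 2 d 1 := by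
      rw [PySem.List.mem_pyRange_one]
      omega
    have := h _ hmem
    simp only [Bool.not_eq_eq_eq_not, Bool.not_true, beq_eq_false_iff_ne] at this
    apply this
    rw [PySem.Int.mod_eq_emod_of_pos (by exact_mod_cast Nat.pos_of_ne_zero hmm0 : (0:Int) < (mm:Int))]
    apply Int.emod_eq_zero_of_dvd
    have : ((mm : Nat) : Int) ∣ ((d.toNat : Nat) : Int) := by exact_mod_cast hdvd
    rwa [Int.toNat_of_nonneg (by omega)] at this
  · intro hp e he
    rw [PySem.List.mem_pyRange_one] at he
    simp only [Bool.not_eq_eq_eq_not, Bool.not_true, beq_eq_false_iff_ne]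
    intro hmod
    rw [PySem.Int.mod_eq_emod_of_pos (by omega)] at hmod
    have hdvd : e ∣ d := Int.dvd_of_emod_eq_zero hmod
    have hdvdN : e.toNat ∣ d.toNat := by
      have h1 : ((e.toNat : Nat) : Int) ∣ ((d.toNat : Nat) : Int) := by
        rw [Int.toNat_of_nonneg (by omega), Int.toNat_of_nonneg (by omega)]
        exact hdvd
      exact_mod_cast h1
    have := (Nat.prime_def_lt.mp hp).2 e.toNat (by omega) hdvdN
    omega

theorem primesFilter_eq (limit : Int) :
    ∀ (t : Nat) (a : Int), 2 ≤ a → (limit - a).toNat = t →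
      (PySem.List.pyRange a limit 1).filter isPrimeTrial
        = (primesIn a.toNat limit.toNat).map (fun (q : Nat) => (q:Int)) := by
  intro t
  induction t with
  | zero =>
    intro a ha ht
    rw [PySem.List.pyRange_one_eq_nil (by omega), primesIn_nil _ _ (by omega)]
    rfl
  | succ t ih =>
    intro a ha ht
    rw [PySem.List.pyRange_one_cons (by omega), List.filter_cons,
        primesIn_cons a.toNat limit.toNat (by omega)]
    have hcast : ((a.toNat : Nat) : Int) = a := Int.toNat_of_nonneg (by omega)
    have hsucc : (a+1).toNat = a.toNat + 1 := by omega
    by_cases hp : Nat.Prime a.toNat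
    · rw [if_pos ((isPrimeTrial_iff a ha).mpr hp), if_pos hp]
      rw [List.map_cons, hcast, ih (a+1) (by omega) (by omega), hsucc]
    · rw [if_neg (by
        intro h
        exact hp ((isPrimeTrial_iff a ha).mp h)), if_neg hp]
      rw [ih (a+1) (by omega) (by omega), hsucc]

theorem trialPN_inv (n limit : Nat) (hn : 2 ≤ n) (hnl : n < limit * limit) :
    ∀ (fuel : Nat) (d m c s : Nat), 2 ≤ d → d ≤ limit → 1 ≤ m → n = s * m →
      (∀ q, Nat.Prime q → q < d → ¬ q ∣ m) →
      (∀ p, Nat.Prime p → p ∣ s → p < d ∧ p * p ≤ n) →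
      c = cnt d n →
      limit - d ≤ fuel →
      (trialPN (primesIn d limit) m c).2 +
        (if 1 < (trialPN (primesIn d limit) m c).1 ∧ (trialPN (primesIn d limit) m c).1 ≠ n then 1 else 0)
        = cnt n n := by
  intro fuel
  induction fuel with
  | zero =>
    intro d m c s hd hdl hm hns hinv hs hc hf
    have hdeq : d = limit := by omega
    subst hdeq
    rw [primesIn_nil _ _ (le_refl d)]
    have hmn : m ∣ n := ⟨s, by rw [hns]; ring⟩
    have hmlen : m ≤ n := Nat.le_of_dvd (by omega) hmn
    simpa [trialPN] using trial_exit n d m c s hn hd hm hns (prime_inv_to_all d m hm hinv) hs hc (by omega)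
  | succ fuel ih =>
    intro d m c s hd hdl hm hns hinv hs hc hf
    have hmn : m ∣ n := ⟨s, by rw [hns]; ring⟩
    have hmlen : m ≤ n := Nat.le_of_dvd (by omega) hmn
    rcases eq_or_lt_of_le hdl with rfl | hdlt
    · rw [primesIn_nil _ _ (le_refl d)]
      simpa [trialPN] using trial_exit n d m c s hn hd hm hns (prime_inv_to_all d m hm hinv) hs hc (by omega)
    · rw [primesIn_cons d limit hdlt]
      by_cases hp : Nat.Prime d
      · rw [if_pos hp]
        by_cases h1 : d * d > m
        · have : trialPN (d :: primesIn (d+1) limit) m c = (m, c) := by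
            simp [trialPN, h1]
          rw [this]
          simpa using trial_exit n d m c s hn hd hm hns (prime_inv_to_all d m hm hinv) hs hc (by omega)
        · push_neg at h1
          by_cases h2 : m % d = 0
          · have hdm : d ∣ m := Nat.dvd_of_mod_eq_zero h2
            obtain ⟨k, hk1, hk2, hk3, hk4⟩ := stripN_spec d hd m m hm (le_refl m)
            set r := stripN m m d with hr
            have hrdvd : r ∣ m := ⟨d ^ k, by rw [hk1]; ring⟩
            have hstep : trialPN (d :: primesIn (d+1) limit) m c = trialPN (primesIn (d+1) limit) r (c+1) := by
              simp [trialPN, h1, h2, ← hr]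
            rw [hstep]
            refine ih (d+1) r (c+1) (s * d ^ k) (by omega) (by omega) hk3 ?_ ?_ ?_ ?_ (by omega)
            · rw [hns, hk1]; ring
            · intro q hqp hqlt
              rcases Nat.lt_or_ge q d with hlt | hge
              · intro hdvd; exact hinv q hqp hlt (dvd_trans hdvd hrdvd)
              · have : q = d := by omega
                subst this; exact hk2
            · intro p' hp' hpdvd
              rcases (Nat.Prime.dvd_mul hp').mp hpdvd with hps | hpk
              · obtain ⟨hlt, hle⟩ := hs p' hp' hps
                exact ⟨by omega, hle⟩
              · have hpd : p' ∣ d := hp'.dvd_of_dvd_pow hpk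
                have : p' = d := (Nat.prime_dvd_prime_iff_eq hp' hp).mp hpd
                subst this
                exact ⟨by omega, le_trans h1 hmlen⟩
            · rw [hc, cnt_succ, if_pos ⟨hp, dvd_trans hdm hmn⟩]
          · have hnd : ¬ d ∣ m := fun h => h2 (Nat.mod_eq_zero_of_dvd h)
            have hstep : trialPN (d :: primesIn (d+1) limit) m c = trialPN (primesIn (d+1) limit) m c := by
              simp [trialPN, h1, h2]
            rw [hstep]
            refine ih (d+1) m c s (by omega) (by omega) hm hns ?_ ?_ ?_ (by omega)
            · intro q hqp hqlt
              rcases Nat.lt_or_ge q d with hlt | hge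
              · exact hinv q hqp hlt
              · have : q = d := by omega
                subst this; exact hnd
            · intro p' hp' hps
              obtain ⟨hlt, hle⟩ := hs p' hp' hps
              exact ⟨by omega, hle⟩
            · rw [hc, cnt_succ, if_neg ?_]
              · simp
              · rintro ⟨hdp, hddvd⟩
                rcases (Nat.Prime.dvd_mul hdp).mp (hns ▸ hddvd) with hds | hdm'
                · exact absurd (hs d hdp hds).1 (by omega)
                · exact hnd hdm'
      · rw [if_neg hp]
        refine ih (d+1) m c s (by omega) (by omega) hm hns ?_ ?_ ?_ (by omega)
        · intro q hqp hqlt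
          rcases Nat.lt_or_ge q d with hlt | hge
          · exact hinv q hqp hlt
          · have : q = d := by omega
            subst this; exact absurd hqp hp
        · intro p' hp' hps
          obtain ⟨hlt, hle⟩ := hs p' hp' hps
          exact ⟨by omega, hle⟩
        · rw [hc, cnt_succ, if_neg (fun h => hp h.1)]
          simp

theorem cnt_two (n : Nat) : cnt 2 n = 0 := by
  unfold cnt
  rw [Finset.card_eq_zero, Finset.filter_eq_empty_iff]
  intro q hq
  simp only [Finset.mem_range] at hq
  rintro ⟨hqp, _⟩
  interval_cases q
  · exact Nat.not_prime_zero hqp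
  · exact Nat.not_prime_one hqp

theorem gB_eq (z n : Int) (hn : 2 ≤ n) (hnz : n < z) :
    (let mc := innerB ((PySem.List.pyRange 2 (limitLoop z z.toNat 2) 1).filter isPrimeTrial) n 0
     if 1 < mc.1 ∧ mc.1 ≠ n then mc.2 + 1 else mc.2) = (cnt n.toNat n.toNat : Int) := by
  obtain ⟨hl2, hl2', hlz, _⟩ := limitLoop_spec z z.toNat 2 (by norm_num) (by omega)
  set limit := limitLoop z z.toNat 2 with hlim
  set N := n.toNat with hN
  set LN := limit.toNat with hLN
  have hNn : ((N : Nat) : Int) = n := Int.toNat_of_nonneg (by omega)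
  have hLl : ((LN : Nat) : Int) = limit := Int.toNat_of_nonneg (by omega)
  have hN2 : 2 ≤ N := by omega
  have hNL : N < LN * LN := by
    have h1 : ((LN * LN : Nat) : Int) = limit * limit := by push_cast; rw [hLl]
    have h2 : ((N : Nat) : Int) < ((LN * LN : Nat) : Int) := by rw [hNn, h1]; omega
    exact_mod_cast h2
  have hprimes : (PySem.List.pyRange 2 limit 1).filter isPrimeTrial
      = (primesIn 2 LN).map (fun (q : Nat) => (q:Int)) := by
    have h := primesFilter_eq limit (limit - 2).toNat 2 (by norm_num) rfl
    rw [h, show (2:Int).toNat = 2 from rfl, hLN]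
  have hq1 : ∀ q ∈ primesIn 2 LN, 1 ≤ q := by
    intro q hq
    unfold primesIn at hq
    rw [List.mem_filter] at hq
    have := (of_decide_eq_true hq.2).two_le
    omega
  have hinner : innerB ((PySem.List.pyRange 2 limit 1).filter isPrimeTrial) n 0
      = (((trialPN (primesIn 2 LN) N 0).1 : Int), ((trialPN (primesIn 2 LN) N 0).2 : Int)) := by
    rw [hprimes, show (n : Int) = ((N : Nat) : Int) from hNn.symm,
        show (0 : Int) = ((0 : Nat) : Int) from rfl]
    exact innerB_eq (primesIn 2 LN) N 0 hq1
  have hres := trialPN_inv N LN hN2 hNL (LN - 2) 2 N 0 1 (le_refl 2) (by omega) (by omega)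
    (by ring) (fun q hq hlt => by
      have := hq.two_le
      omega)
    (fun p hp hps => absurd (Nat.eq_one_of_dvd_one hps) hp.ne_one)
    (cnt_two N).symm (le_refl _)
  simp only [hinner]
  by_cases h : 1 < (trialPN (primesIn 2 LN) N 0).1 ∧ (trialPN (primesIn 2 LN) N 0).1 ≠ N
  · rw [if_pos ⟨by exact_mod_cast h.1, by rw [← hNn]; exact_mod_cast h.2⟩]
    rw [if_pos h] at hres
    push_cast [← hres]
    ring
  · rw [if_neg (by
      rintro ⟨h1, h2⟩
      exact h ⟨by exact_mod_cast h1, by rw [← hNn] at h2; exact_mod_cast h2⟩)]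
    rw [if_neg h] at hres
    push_cast [← hres]
    ring

theorem portB_eq_spec (z : Int) : findPrimeDivisorCountUnder_alt z = specList z := by
  unfold findPrimeDivisorCountUnder_alt specList
  obtain ⟨hlen, hval⟩ := fold_set_eval (fun n =>
      let mc := innerB ((PySem.List.pyRange 2 (limitLoop z z.toNat 2) 1).filter isPrimeTrial) n 0
      if 1 < mc.1 ∧ mc.1 ≠ n then mc.2 + 1 else mc.2) z (z - 2).toNat 2
      (List.replicate (z-1).toNat 0) (by omega) rfl
  rw [List.length_replicate] at hlen hval
  apply List.ext_getElem (by rw [hlen]; simp)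
  intro i h1 h2
  have hiL : i < (z-1).toNat := by rw [hlen] at h1; exact h1
  have hR : (List.map (fun i => ((cnt (i+1) (i+1) : Nat) : Int)) (List.range (z-1).toNat))[i]
      = ((cnt (i+1) (i+1) : Nat) : Int) := by
    rw [List.getElem_map]
    congr 2 <;> rw [List.getElem_range]
  rw [hR, ← List.getD_eq_getElem _ 0 h1, hval i hiL]
  by_cases hi0 : i = 0
  · subst hi0
    rw [if_neg (by omega)]
    rw [List.getD_replicate _ hiL]
    rw [show cnt 1 1 = 0 from by decide]
    rfl
  · rw [if_pos (by omega)]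
    have hg := gB_eq z ((i:Int)+1) (by omega) (by omega)
    simp only [] at hg
    rw [hg]
    have htn : ((i:Int)+1).toNat = i+1 := by omega
    rw [htn]

-- ===== VERDICT (by name: the statement is the Claim_ definition above) =====
theorem findPrimeDivisorCountUnder_spec : Claim_equal_findPrimeDivisorCountUnder := by
  intro z _
  unfold Spec_findPrimeDivisorCountUnder
  rw [portA_eq_spec, portB_eq_spec]
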